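-- pv_equiv track=rewrite | github.com/manwar/perlweeklychallenge-club | challenge-252/packy-anderson/python/ch-2.py | uniqueSumZero
-- ===== SOURCE A (Python) =====
-- def uniqueSumZero(n):
--     zero_sum_list = []
--     x = 1
--     while n > 0:
--         if (n % 2 == 1): # n is odd
--             zero_sum_list.append(0)
--             n -= 1
--         else: # n is even
--             zero_sum_list.append(x * -1)
--             zero_sum_list.append(x)
--             x += 1
--             n -= 2
--     zero_sum_list.sort()
--     return zero_sum_list
-- ===== SOURCE B (Python) =====
-- def uniqueSumZero(n):
--     if n <= 0:
--         return []
--     k = n // 2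
--     mid = [0] if n % 2 == 1 else []
--     return list(range(-k, 0)) + mid + list(range(1, k + 1))
-- ===== Notes on version B (the rewrite author's own statement) =====
-- stated objective: faster
-- what changed: B emits the sorted symmetric range [-k..-1] (+ [0] if n is odd) ++ [1..k] directly in one closed form instead of A's append loop followed by a sort.
import Mathlib
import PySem

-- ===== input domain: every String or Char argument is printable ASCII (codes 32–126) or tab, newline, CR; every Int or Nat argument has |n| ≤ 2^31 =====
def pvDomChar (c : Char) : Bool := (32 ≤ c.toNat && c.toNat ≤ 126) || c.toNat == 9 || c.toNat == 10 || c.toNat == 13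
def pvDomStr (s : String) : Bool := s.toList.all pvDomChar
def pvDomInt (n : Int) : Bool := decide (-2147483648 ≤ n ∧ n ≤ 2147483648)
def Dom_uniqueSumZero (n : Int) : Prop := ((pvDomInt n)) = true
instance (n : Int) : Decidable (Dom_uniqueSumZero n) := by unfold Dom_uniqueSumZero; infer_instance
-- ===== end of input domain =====

-- B replaces A's append-loop-then-sort by directly emitting the sorted symmetric range (plus 0 when n is odd).


-- ===== PORT A =====
-- the while loop of A: state (n, x, zero_sum_list)
def pvLoopA (n x : Int) (acc : List Int) : List Int :=
  if 0 < n then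
    if PySem.Int.mod n 2 == 1 then
      pvLoopA (n - 1) x (acc ++ [0])
    else
      pvLoopA (n - 2) (x + 1) (acc ++ [x * -1, x])
  else acc
termination_by n.toNat
decreasing_by all_goals omega

def uniqueSumZero (n : Int) : List Int :=
  PySem.List.sorted (pvLoopA n 1 []) (fun v => v) false

-- ===== PORT B =====
def uniqueSumZero_alt (n : Int) : List Int :=
  if n ≤ 0 then []
  else
    let k := PySem.Int.floordiv n 2
    PySem.List.pyRange (-k) 0 1
      ++ (if PySem.Int.mod n 2 == 1 then [0] else [])
      ++ PySem.List.pyRange 1 (k + 1) 1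

-- ===== PRECONDITION & SPEC =====
def Spec_uniqueSumZero (n : Int) (out : List Int) : Prop := out = uniqueSumZero_alt n
instance (n : Int) (out : List Int) : Decidable (Spec_uniqueSumZero n out) := by unfold Spec_uniqueSumZero; infer_instance

-- ===== CLAIM (what is proved, stated in full; the proofs are below) =====
def Claim_equal_uniqueSumZero : Prop := ∀ (n : Int), Dom_uniqueSumZero n → Spec_uniqueSumZero n (uniqueSumZero n)

-- ===== LEMMAS AND PROOFS =====

-- the unsorted pair part A's loop builds once n is even: [-x, x, -(x+1), x+1, …] (k pairs)
def pvPairs : Nat → Int → List Int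
  | 0, _ => []
  | k + 1, x => (x * -1) :: x :: pvPairs k (x + 1)

theorem pvLoopA_even (k : Nat) : ∀ (x : Int) (acc : List Int),
    pvLoopA (2 * (k : Int)) x acc = acc ++ pvPairs k x := by
  induction k with
  | zero => intro x acc; rw [pvLoopA]; simp [pvPairs]
  | succ k ih =>
    intro x acc
    rw [pvLoopA]
    have hpos : (0 : Int) < 2 * ((k : Int) + 1) := by positivity
    push_cast
    rw [if_pos hpos, if_neg (by simp)]
    have h2 : 2 * ((k : Int) + 1) - 2 = 2 * (k : Int) := by ring
    rw [h2, ih (x + 1) (acc ++ [x * -1, x])]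
    simp [pvPairs]

theorem pvLoopA_odd (k : Nat) (x : Int) (acc : List Int) :
    pvLoopA (2 * (k : Int) + 1) x acc = acc ++ 0 :: pvPairs k x := by
  rw [pvLoopA]
  have hpos : (0 : Int) < 2 * (k : Int) + 1 := by positivity
  rw [if_pos hpos, if_pos (by simp)]
  have h1 : 2 * (k : Int) + 1 - 1 = 2 * (k : Int) := by ring
  rw [h1, pvLoopA_even k x (acc ++ [0])]
  simp

theorem pvPairs_perm (k : Nat) : ∀ (x : Int),
    (PySem.List.pyRange (-(x + k) + 1) (-x + 1) 1 ++ PySem.List.pyRange x (x + k) 1).Perm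
      (pvPairs k x) := by
  induction k with
  | zero =>
    intro x
    simp only [pvPairs, Nat.cast_zero, add_zero]
    rw [PySem.List.pyRange_one_eq_nil (by omega), PySem.List.pyRange_one_eq_nil (by omega)]
    exact List.Perm.refl _
  | succ k ih =>
    intro x
    have hcast : ((k + 1 : Nat) : Int) = (k : Int) + 1 := by push_cast; ring
    rw [hcast]
    have hL : PySem.List.pyRange (-(x + ((k : Int) + 1)) + 1) (-x + 1) 1
        = PySem.List.pyRange (-(x + ((k : Int) + 1)) + 1) (-x) 1 ++ [-x] :=
      PySem.List.pyRange_one_succ_right (by omega)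
    have hR : PySem.List.pyRange x (x + ((k : Int) + 1)) 1
        = x :: PySem.List.pyRange (x + 1) (x + ((k : Int) + 1)) 1 :=
      PySem.List.pyRange_one_cons (by omega)
    rw [hL, hR]
    have hih := ih (x + 1)
    rw [show -(x + 1 + (k : Int)) + 1 = -(x + ((k : Int) + 1)) + 1 by ring,
        show (-(x + 1) : Int) + 1 = -x by ring,
        show (x + 1) + (k : Int) = x + ((k : Int) + 1) by ring] at hih
    have e1 : (PySem.List.pyRange (-(x + ((k : Int) + 1)) + 1) (-x) 1 ++ [-x])
        ++ x :: PySem.List.pyRange (x + 1) (x + ((k : Int) + 1)) 1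
        = PySem.List.pyRange (-(x + ((k : Int) + 1)) + 1) (-x) 1
          ++ (-x :: x :: PySem.List.pyRange (x + 1) (x + ((k : Int) + 1)) 1) := by simp
    rw [e1]
    have hx : x * -1 = -x := by ring
    simp only [pvPairs, hx]
    exact List.perm_middle.trans
      (List.Perm.cons (-x) (List.perm_middle.trans (List.Perm.cons x hih)))

theorem pvTarget_pairwise (k : Nat) (mid : List Int) (hm : mid = [] ∨ mid = [0]) :
    (PySem.List.pyRange (-(k : Int)) 0 1 ++ mid ++ PySem.List.pyRange 1 ((k : Int) + 1) 1).Pairwise (· < ·) := by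
  rw [List.pairwise_append, List.pairwise_append]
  refine ⟨⟨PySem.List.pairwise_lt_pyRange_one _ _, ?_, ?_⟩, PySem.List.pairwise_lt_pyRange_one _ _, ?_⟩
  · rcases hm with h | h <;> simp [h]
  · intro a ha b hb
    rcases hm with h | h
    · simp [h] at hb
    · simp [h] at hb
      rw [PySem.List.mem_pyRange_one] at ha; omega
  · intro a ha b hb
    rw [List.mem_append] at ha
    rw [PySem.List.mem_pyRange_one] at hb
    rcases ha with ha | ha
    · rw [PySem.List.mem_pyRange_one] at ha; omega
    · rcases hm with h | h
      · simp [h] at ha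
      · simp [h] at ha; omega

-- ===== VERDICT (by name: the statement is the Claim_ definition above) =====
theorem uniqueSumZero_spec : Claim_equal_uniqueSumZero := by
  intro n _
  unfold Spec_uniqueSumZero uniqueSumZero uniqueSumZero_alt
  by_cases hn : n ≤ 0
  · rw [pvLoopA, if_neg (by omega)]
    simp [hn, PySem.List.sorted]
  · rw [if_neg hn]
    replace hn : 0 < n := by omega
    obtain ⟨k, hk⟩ : ∃ k : Nat, n = 2 * (k : Int) ∨ n = 2 * (k : Int) + 1 :=
      ⟨(n / 2).toNat, by omega⟩
    have hfd : PySem.Int.floordiv n 2 = (k : Int) := by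
      rw [PySem.Int.floordiv_eq_ediv_of_pos (by norm_num)]; omega
    rw [hfd]
    have hp := pvPairs_perm k 1
    rw [show -((1 : Int) + (k : Int)) + 1 = -(k : Int) by ring,
        show (-(1 : Int)) + 1 = 0 by ring,
        show (1 : Int) + (k : Int) = (k : Int) + 1 by ring] at hp
    rcases hk with hk | hk
    · rw [hk, pvLoopA_even k 1 [], if_neg (by simp)]
      simp only [List.nil_append, List.append_nil]
      apply PySem.List.sorted_eq_of_perm_of_pairwise_lt
      · exact hp
      · simpa using pvTarget_pairwise k [] (Or.inl rfl)
    · rw [hk, pvLoopA_odd k 1 [], if_pos (by simp)]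
      simp only [List.nil_append]
      apply PySem.List.sorted_eq_of_perm_of_pairwise_lt
      · have e : PySem.List.pyRange (-(k : Int)) 0 1 ++ [0] ++ PySem.List.pyRange 1 ((k : Int) + 1) 1
            = PySem.List.pyRange (-(k : Int)) 0 1 ++ ((0 : Int) :: PySem.List.pyRange 1 ((k : Int) + 1) 1) := by
          simp
        rw [e]
        exact List.perm_middle.trans (List.Perm.cons 0 hp)
      · exact pvTarget_pairwise k [0] (Or.inr rfl)
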